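-- pv_equiv track=rewrite | github.com/AyeletShmaya/Boggle | boggle/ex11_utils.py | is_valid_path
-- ===== SOURCE A (Python) =====
-- from typing import List, Tuple, Iterable, Optional, Dict
-- from copy import deepcopy
--
-- Board = List[List[str]]
--
-- Path = List[Tuple[int, int]]
--
-- POSSIBLE_MOVES = [(1, 0), (0, 1), (-1, 0), (0, -1), (1, 1), (1, -1), (-1, 1), (-1, -1)]
--
-- def is_valid_path(board: Board, path: Path, words: Iterable[str]) -> Optional[str]:
--     """this function returns None if the path is not valid or it is creating a not valid word,
--         otherwise it returns the word created"""
--     if len(path) == 0: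
--         return
--
--     board_points = all_points_in_board(board)
--     word = ""
--     twice_same_point = sorted(path) != sorted(list(set(path)))
--     possible_coordinates = [path[0]]
--
--     if twice_same_point:
--         return None
--
--     # Starting point
--     if path[0] not in board_points:
--         return None
--
--     for point in path:
--         if point not in possible_coordinates:
--             return None
--
--         possible_coordinates = list(
--             map(
--                 lambda tuple: (point[0] + tuple[0], point[1] + tuple[1]), POSSIBLE_MOVES
--             )
--         )
--         temp_list = [value for value in board_points if value in possible_coordinates]
--         possible_coordinates = deepcopy(temp_list)
--
--         # Concatenate word
--         word += board[point[0]][point[1]]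
--
--     if word not in words:
--         return None
--     return word
--
-- def all_points_in_board(board):
--     return [(i, j) for i in range(len(board)) for j in range(len(board[0]))]
-- ===== SOURCE B (Python) =====
-- def is_valid_path(board, path, words):
--     if not path:
--         return None
--     n_rows = len(board)
--     n_cols = len(board[0]) if board else 0
--     seen = set()
--     prev = None
--     word = ""
--     for r, c in path:
--         if not (0 <= r < n_rows and 0 <= c < n_cols):
--             return None
--         if (r, c) in seen:
--             return None
--         if prev is not None and (abs(r - prev[0]) > 1 or abs(c - prev[1]) > 1):
--             return None
--         seen.add((r, c))
--         word += board[r][c]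
--         prev = (r, c)
--     return word if word in words else None
-- ===== Notes on version B (the rewrite author's own statement) =====
-- stated objective: simpler
-- what changed: A precomputes the full board-point list, detects duplicates by comparing sorted(path) with sorted(set(path)), and rebuilds a filtered neighbour list every step; B makes one pass keeping only a visited set and the previous cell, testing bounds and 8-adjacency arithmetically.
-- outside the precondition, e.g. on is_valid_path([['a', 'b'], ['c']], [(1, 1), (1, 1)], []): A returns None, B raises IndexError
import Mathlib
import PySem

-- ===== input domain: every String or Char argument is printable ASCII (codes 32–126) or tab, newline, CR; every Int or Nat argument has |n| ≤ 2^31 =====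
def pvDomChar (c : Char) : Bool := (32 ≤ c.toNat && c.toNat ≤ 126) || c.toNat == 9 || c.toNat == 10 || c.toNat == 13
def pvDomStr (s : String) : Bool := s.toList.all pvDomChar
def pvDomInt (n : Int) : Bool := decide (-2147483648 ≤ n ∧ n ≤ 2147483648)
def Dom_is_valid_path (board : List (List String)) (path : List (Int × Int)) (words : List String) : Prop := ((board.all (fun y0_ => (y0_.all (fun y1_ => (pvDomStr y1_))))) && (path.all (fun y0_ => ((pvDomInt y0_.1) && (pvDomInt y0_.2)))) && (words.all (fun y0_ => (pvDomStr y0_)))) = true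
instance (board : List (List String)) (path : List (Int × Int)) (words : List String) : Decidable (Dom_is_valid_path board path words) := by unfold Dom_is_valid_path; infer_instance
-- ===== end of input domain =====

-- B replaces A's board-point list, global duplicate sort-check and per-step neighbour-list
-- rebuilding with a single pass keeping a visited set, the previous cell and arithmetic
-- bounds/adjacency tests (objective: simpler).


-- ===== PORT A =====
def POSSIBLE_MOVES : List (Int × Int) :=
  [(1, 0), (0, 1), (-1, 0), (0, -1), (1, 1), (1, -1), (-1, 1), (-1, -1)]

-- [(i, j) for i in range(len(board)) for j in range(len(board[0]))]
def all_points_in_board (board : List (List String)) : List (Int × Int) :=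
  (PySem.List.pyRange 0 board.length 1).flatMap (fun i =>
    (PySem.List.pyRange 0 (PySem.List.pyGetD board 0 []).length 1).map (fun j => (i, j)))

-- the 'for point in path' loop of A: state = (possible_coordinates, word)
def aLoop (board : List (List String)) (bp : List (Int × Int)) :
    List (Int × Int) → List (Int × Int) → String → Option String
  | [], _, word => some word
  | p :: rest, poss, word =>
    if p ∈ poss then
      aLoop board bp rest
        (bp.filter (fun v => v ∈ POSSIBLE_MOVES.map (fun m => (p.1 + m.1, p.2 + m.2))))
        (word ++ PySem.List.pyGetD (PySem.List.pyGetD board p.1 []) p.2 "")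
    else none

def is_valid_path (board : List (List String)) (path : List (Int × Int)) (words : List String) : Option String :=
  match path with
  | [] => none
  | p0 :: _ =>
    let board_points := all_points_in_board board
    -- twice_same_point = sorted(path) != sorted(list(set(path)))
    if PySem.List.sorted2 path (·.1) (·.2) ≠ PySem.List.sorted2 (PySem.Set.ofList path) (·.1) (·.2) then
      none
    else if p0 ∉ board_points then none
    else
      match aLoop board board_points path [p0] "" with
      | none => none
      | some word => if word ∈ words then some word else none

-- ===== PORT B =====
-- the 'for r, c in path' loop of B: state = (seen, prev, word)
def bLoop (board : List (List String)) (nrows ncols : Int) :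
    List (Int × Int) → PySem.Set (Int × Int) → Option (Int × Int) → String → Option String
  | [], _, _, word => some word
  | (r, c) :: rest, seen, prev, word =>
    if 0 ≤ r ∧ r < nrows ∧ 0 ≤ c ∧ c < ncols then
      if (r, c) ∈ seen then none
      else if (match prev with
               | none => false
               | some q => decide (1 < |r - q.1| ∨ 1 < |c - q.2|)) then none
      else
        bLoop board nrows ncols rest (PySem.Set.add seen (r, c)) (some (r, c))
          (word ++ PySem.List.pyGetD (PySem.List.pyGetD board r []) c "")
    else none

def is_valid_path_alt (board : List (List String)) (path : List (Int × Int)) (words : List String) : Option String :=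
  match path with
  | [] => none
  | _ :: _ =>
    let nrows : Int := board.length
    let ncols : Int := if board.isEmpty then 0 else (PySem.List.pyGetD board 0 []).length
    match bLoop board nrows ncols path PySem.Set.empty none "" with
    | none => none
    | some word => if word ∈ words then some word else none

-- ===== PRECONDITION & SPEC =====
-- Pre_ excludes ragged boards on which some path cell lies inside the rectangle
-- len(board) × len(board[0]) but beyond its own (shorter) row: A's board[r][c] access
-- generally raises IndexError there (A may still return None when an earlier check,
-- e.g. the duplicate test, fires first — see the cite in claim.json).
def Pre_is_valid_path (board : List (List String)) (path : List (Int × Int)) (words : List String) : Prop :=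
  ∀ p ∈ path,
    (0 ≤ p.1 ∧ p.1 < (board.length : Int) ∧ 0 ≤ p.2 ∧ p.2 < ((board.headD []).length : Int)) →
      p.2 < ((board.getD p.1.toNat []).length : Int)
instance (board : List (List String)) (path : List (Int × Int)) (words : List String) : Decidable (Pre_is_valid_path board path words) := by unfold Pre_is_valid_path; infer_instance

def pvWitness_is_valid_path : List (List String) × (List (Int × Int)) × List String :=
  ([["a", "b"], ["c", "d"]], [(0, 0), (1, 1)], ["ad", "x"])

def Spec_is_valid_path (board : List (List String)) (path : List (Int × Int)) (words : List String) (out : Option String) : Prop := out = is_valid_path_alt board path words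
instance (board : List (List String)) (path : List (Int × Int)) (words : List String) (out : Option String) : Decidable (Spec_is_valid_path board path words out) := by unfold Spec_is_valid_path; infer_instance

-- ===== CLAIM (what is proved, stated in full; the proofs are below) =====
def Claim_equal_is_valid_path : Prop := ∀ (board : List (List String)) (path : List (Int × Int)) (words : List String), Dom_is_valid_path board path words → Pre_is_valid_path board path words → Spec_is_valid_path board path words (is_valid_path board path words)

-- ===== LEMMAS AND PROOFS =====

-- a fold of Set.add over fresh distinct elements appends them
lemma foldl_add_of_fresh (xs : List (Int × Int)) :
    ∀ s : PySem.Set (Int × Int), xs.Nodup → (∀ x ∈ xs, x ∉ s) →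
      xs.foldl PySem.Set.add s = s ++ xs := by
  induction xs with
  | nil => intro s _ _; simp
  | cons x t ih =>
    intro s hnd hf
    simp only [List.foldl_cons]
    rw [PySem.Set.add_of_not_mem (hf x (by simp))]
    rw [ih (s ++ [x]) (List.nodup_cons.mp hnd).2]
    · simp
    · intro q hq
      simp only [List.mem_append, List.mem_singleton]
      rintro (h | rfl)
      · exact hf q (by simp [hq]) h
      · exact (List.nodup_cons.mp hnd).1 hq

lemma ofList_eq_self {xs : List (Int × Int)} (h : xs.Nodup) : PySem.Set.ofList xs = xs := by
  rw [PySem.Set.ofList_eq_foldl, foldl_add_of_fresh xs [] h (by simp)]; simp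

-- A's duplicate test: sorted(path) == sorted(list(set(path))) iff path has no duplicates
lemma twice_iff (path : List (Int × Int)) :
    PySem.List.sorted2 path (·.1) (·.2) = PySem.List.sorted2 (PySem.Set.ofList path) (·.1) (·.2)
      ↔ path.Nodup := by
  constructor
  · intro h
    have h1 := PySem.List.sorted2_perm path (·.1) (·.2) false
    have h2 := PySem.List.sorted2_perm (PySem.Set.ofList path) (·.1) (·.2) false
    have : (PySem.Set.ofList path).Perm path := (h2.symm.trans (h ▸ h1))
    exact this.nodup (PySem.Set.nodup_ofList path)
  · intro h; rw [ofList_eq_self h]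

-- membership in A's board_points list
lemma mem_bp (board : List (List String)) (q : Int × Int) :
    q ∈ all_points_in_board board ↔
      0 ≤ q.1 ∧ q.1 < (board.length : Int) ∧ 0 ≤ q.2 ∧
        q.2 < ((PySem.List.pyGetD board 0 []).length : Int) := by
  obtain ⟨r, c⟩ := q
  simp only [all_points_in_board, List.mem_flatMap, List.mem_map, PySem.List.mem_pyRange_one]
  constructor
  · rintro ⟨i, ⟨hi0, hil⟩, j, ⟨hj0, hjl⟩, heq⟩
    cases heq; exact ⟨hi0, hil, hj0, hjl⟩
  · rintro ⟨h1, h2, h3, h4⟩; exact ⟨r, ⟨h1, h2⟩, c, ⟨h3, h4⟩, rfl⟩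

-- membership in A's rebuilt possible_coordinates neighbour list
lemma mem_neighbors (p q : Int × Int) :
    q ∈ POSSIBLE_MOVES.map (fun m => (p.1 + m.1, p.2 + m.2)) ↔
      q ≠ p ∧ |q.1 - p.1| ≤ 1 ∧ |q.2 - p.2| ≤ 1 := by
  obtain ⟨r, c⟩ := q
  simp [POSSIBLE_MOVES, Prod.ext_iff, abs_le]
  omega

-- B's loop returns none whenever the remaining path repeats a cell or revisits a seen one
lemma bLoop_none_of_dup (board : List (List String)) (nrows ncols : Int) :
    ∀ (rest : List (Int × Int)) (seen : PySem.Set (Int × Int)) (prev : Option (Int × Int)) (word : String),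
      ¬(rest.Nodup ∧ ∀ q ∈ rest, q ∉ seen) →
      bLoop board nrows ncols rest seen prev word = none := by
  intro rest
  induction rest with
  | nil => intro _ _ _ h; exact absurd ⟨List.nodup_nil, by simp⟩ h
  | cons p t ih =>
    intro seen prev word h
    obtain ⟨r, c⟩ := p
    by_cases hb : 0 ≤ r ∧ r < nrows ∧ 0 ≤ c ∧ c < ncols
    · by_cases hs : (r, c) ∈ seen
      · simp only [bLoop]; rw [if_pos hb, if_pos hs]
      · have hih : bLoop board nrows ncols t (PySem.Set.add seen (r, c)) (some (r, c))
            (word ++ PySem.List.pyGetD (PySem.List.pyGetD board r []) c "") = none := by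
          apply ih
          rintro ⟨hnd, hf⟩
          apply h
          refine ⟨List.nodup_cons.mpr ⟨?_, hnd⟩, ?_⟩
          · intro hmem
            exact absurd ((PySem.Set.mem_add _ _ _).mpr (Or.inr rfl)) (hf _ hmem)
          · rintro q hq
            rcases List.mem_cons.mp hq with rfl | hq'
            · exact hs
            · intro hsq
              exact hf q hq' ((PySem.Set.mem_add _ _ _).mpr (Or.inl hsq))
        cases prev with
        | none =>
          simp only [bLoop]
          rw [if_pos hb, if_neg hs, if_neg (by simp)]
          exact hih
        | some q =>
          simp only [bLoop]
          rw [if_pos hb, if_neg hs]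
          by_cases ha : (1 < |r - q.1| ∨ 1 < |c - q.2|)
          · rw [if_pos (by simpa using ha)]
          · rw [if_neg (by simpa using ha)]
            exact hih
    · simp only [bLoop]; rw [if_neg hb]

-- the main loop correspondence, after the first cell has been processed
lemma loop_eq (board : List (List String)) :
    ∀ (rest : List (Int × Int)) (seen : PySem.Set (Int × Int)) (p : Int × Int) (word : String),
      rest.Nodup → (∀ q ∈ rest, q ∉ seen) → p ∉ rest →
      aLoop board (all_points_in_board board) rest
          ((all_points_in_board board).filter
            (fun v => v ∈ POSSIBLE_MOVES.map (fun m => (p.1 + m.1, p.2 + m.2))))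
          word
        = bLoop board (board.length : Int)
            (if board.isEmpty then 0 else ((PySem.List.pyGetD board 0 []).length : Int))
            rest seen (some p) word := by
  intro rest
  induction rest with
  | nil => intro _ _ _ _ _ _; rfl
  | cons q t ih =>
    intro seen p word hnd hf hp
    obtain ⟨r, c⟩ := q
    have hbp : ((r, c) ∈ all_points_in_board board) ↔
        (0 ≤ r ∧ r < (board.length : Int) ∧ 0 ≤ c ∧
          c < (if board.isEmpty then (0 : Int) else ((PySem.List.pyGetD board 0 []).length : Int))) := by
      rw [mem_bp]
      rcases board with _ | ⟨row, brest⟩ <;> simp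
    have hseen : (r, c) ∉ seen := hf (r, c) (by simp)
    have hne : (r, c) ≠ p := fun h => hp (by simp [← h])
    have hmemf : ((r, c) ∈ (all_points_in_board board).filter
        (fun v => v ∈ POSSIBLE_MOVES.map (fun m => (p.1 + m.1, p.2 + m.2)))) ↔
        ((r, c) ∈ all_points_in_board board ∧ ((r, c) ≠ p ∧ |r - p.1| ≤ 1 ∧ |c - p.2| ≤ 1)) := by
      simp [List.mem_filter, mem_neighbors]
    by_cases hb : 0 ≤ r ∧ r < (board.length : Int) ∧ 0 ≤ c ∧
        c < (if board.isEmpty then (0 : Int) else ((PySem.List.pyGetD board 0 []).length : Int))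
    · by_cases hadj : |r - p.1| ≤ 1 ∧ |c - p.2| ≤ 1
      · have hA : aLoop board (all_points_in_board board) ((r, c) :: t)
            ((all_points_in_board board).filter
              (fun v => v ∈ POSSIBLE_MOVES.map (fun m => (p.1 + m.1, p.2 + m.2)))) word
            = aLoop board (all_points_in_board board) t
              ((all_points_in_board board).filter
                (fun v => v ∈ POSSIBLE_MOVES.map (fun m => ((r, c).1 + m.1, (r, c).2 + m.2))))
              (word ++ PySem.List.pyGetD (PySem.List.pyGetD board (r, c).1 []) (r, c).2 "") := by
          simp only [aLoop]
          rw [if_pos (hmemf.mpr ⟨hbp.mpr hb, hne, hadj.1, hadj.2⟩)]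
        have hB : bLoop board (board.length : Int)
            (if board.isEmpty then 0 else ((PySem.List.pyGetD board 0 []).length : Int))
            ((r, c) :: t) seen (some p) word
            = bLoop board (board.length : Int)
              (if board.isEmpty then 0 else ((PySem.List.pyGetD board 0 []).length : Int))
              t (PySem.Set.add seen (r, c)) (some (r, c))
              (word ++ PySem.List.pyGetD (PySem.List.pyGetD board r []) c "") := by
          simp only [bLoop]
          rw [if_pos hb, if_neg hseen,
            if_neg (by simp only [lt_abs, decide_eq_true_eq]
                       rcases hadj with ⟨h1, h2⟩
                       rw [abs_le] at h1 h2
                       omega)]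
        rw [hA, hB]
        apply ih
        · exact (List.nodup_cons.mp hnd).2
        · intro q' hq'
          rw [PySem.Set.mem_add]
          rintro (hs | rfl)
          · exact hf q' (by simp [hq']) hs
          · exact (List.nodup_cons.mp hnd).1 hq'
        · exact (List.nodup_cons.mp hnd).1
      · have hA : aLoop board (all_points_in_board board) ((r, c) :: t)
            ((all_points_in_board board).filter
              (fun v => v ∈ POSSIBLE_MOVES.map (fun m => (p.1 + m.1, p.2 + m.2)))) word
            = none := by
          simp only [aLoop]
          rw [if_neg (fun hmem => hadj ⟨(hmemf.mp hmem).2.2.1, (hmemf.mp hmem).2.2.2⟩)]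
        have hB : bLoop board (board.length : Int)
            (if board.isEmpty then 0 else ((PySem.List.pyGetD board 0 []).length : Int))
            ((r, c) :: t) seen (some p) word = none := by
          simp only [bLoop]
          rw [if_pos hb, if_neg hseen,
            if_pos (by simp only [lt_abs, decide_eq_true_eq]
                       rw [Decidable.not_and_iff_or_not] at hadj
                       rcases hadj with h1 | h1 <;> rw [not_le, lt_abs] at h1 <;> omega)]
        rw [hA, hB]
    · have hA : aLoop board (all_points_in_board board) ((r, c) :: t)
          ((all_points_in_board board).filter
            (fun v => v ∈ POSSIBLE_MOVES.map (fun m => (p.1 + m.1, p.2 + m.2)))) word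
          = none := by
        simp only [aLoop]
        rw [if_neg (fun hmem => hb (hbp.mp (hmemf.mp hmem).1))]
      have hB : bLoop board (board.length : Int)
          (if board.isEmpty then 0 else ((PySem.List.pyGetD board 0 []).length : Int))
          ((r, c) :: t) seen (some p) word = none := by
        simp only [bLoop]
        rw [if_neg hb]
      rw [hA, hB]

-- ===== VERDICT (by name: the statement is the Claim_ definition above) =====
theorem is_valid_path_spec : Claim_equal_is_valid_path := by
  intro board path words _hdom _hpre
  unfold Spec_is_valid_path is_valid_path is_valid_path_alt
  match path with
  | [] => rfl
  | p0 :: rest =>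
    simp only
    by_cases hnd : (p0 :: rest).Nodup
    · rw [if_neg (by simp [twice_iff, hnd])]
      obtain ⟨r0, c0⟩ := p0
      have hbp : ((r0, c0) ∈ all_points_in_board board) ↔
          (0 ≤ r0 ∧ r0 < (board.length : Int) ∧ 0 ≤ c0 ∧
            c0 < (if board.isEmpty then (0 : Int) else ((PySem.List.pyGetD board 0 []).length : Int))) := by
        rw [mem_bp]
        rcases board with _ | ⟨row, brest⟩ <;> simp
      by_cases h0 : (r0, c0) ∈ all_points_in_board board
      · rw [if_neg (by simp [h0])]
        have hstep : bLoop board (board.length : Int)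
            (if board.isEmpty then 0 else ((PySem.List.pyGetD board 0 []).length : Int))
            ((r0, c0) :: rest) PySem.Set.empty none "" =
            bLoop board (board.length : Int)
            (if board.isEmpty then 0 else ((PySem.List.pyGetD board 0 []).length : Int))
            rest (PySem.Set.add PySem.Set.empty (r0, c0)) (some (r0, c0))
            ("" ++ PySem.List.pyGetD (PySem.List.pyGetD board r0 []) c0 "") := by
          simp only [bLoop]
          rw [if_pos (hbp.mp h0)]
          rw [if_neg (by simp [PySem.Set.empty]), if_neg (by simp)]
        rw [hstep]
        have hfirst : aLoop board (all_points_in_board board) ((r0, c0) :: rest)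
            [(r0, c0)] "" = aLoop board (all_points_in_board board) rest
            ((all_points_in_board board).filter
              (fun v => v ∈ POSSIBLE_MOVES.map (fun m => (r0 + m.1, c0 + m.2))))
            ("" ++ PySem.List.pyGetD (PySem.List.pyGetD board r0 []) c0 "") := by
          simp only [aLoop]
          rw [if_pos (by simp)]
        rw [hfirst]
        rw [loop_eq board rest (PySem.Set.add PySem.Set.empty (r0, c0)) (r0, c0) _
          (List.nodup_cons.mp hnd).2
          (by intro q hq
              rw [PySem.Set.mem_add]
              rintro (hs | rfl)
              · simp [PySem.Set.empty] at hs
              · exact (List.nodup_cons.mp hnd).1 hq)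
          (List.nodup_cons.mp hnd).1]
      · rw [if_pos (by simp [h0])]
        have : bLoop board (board.length : Int)
            (if board.isEmpty then 0 else ((PySem.List.pyGetD board 0 []).length : Int))
            ((r0, c0) :: rest) PySem.Set.empty none "" = none := by
          simp only [bLoop]
          rw [if_neg (fun h => h0 (hbp.mpr h))]
        rw [this]
    · rw [if_pos (by simp [twice_iff, hnd])]
      rw [bLoop_none_of_dup board _ _ _ _ _ _ (by rintro ⟨h, _⟩; exact hnd h)]
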